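-- pv_equiv track=rewrite | github.com/0hhanum/algorithm_study | programmers/heap/more_spicy.py | solution
-- ===== SOURCE A (Python) =====
-- def heap_pop(heap):
--     top_node = heap.pop(0)
--     if len(heap) == 0:
--         return top_node
--     last_node = heap.pop()
--     index = 0
--     heap.insert(index, last_node)
--     while True:
--         a = index * 2 + 1
--         b = a + 1
--         try:
--             a_node = heap[a]
--             b_node = heap[b]
--         except IndexError:
--             return top_node
--         if a_node > b_node:
--             target = b
--         else:
--             target = a
--         if heap[target] < last_node:
--             heap[index] = heap[target]
--             heap[target] = last_node
--             index = target
--         else: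
--             return top_node
--
-- def heap_add(heap, node):
--     heap.append(node)
--     index = len(heap) - 1
--     if index == 0:
--         return
--     while True:
--         if index % 2 == 0:
--             target = int((index - 2) / 2)
--         else:
--             target = int((index - 1) / 2)
--         if heap[target] > node:
--             heap[index] = heap[target]
--             heap[target] = node
--             index = target
--         else:
--             return
--
-- def solution(scoville, K):
--     answer = 0
--     scoville.sort()
--     while scoville[0] < K:
--         answer += 1
--         a = heap_pop(scoville)
--         b = heap_pop(scoville)
--         heap_add(scoville, a + 2 * b)
--         if len(scoville) == 1 and scoville[0] < K:
--             return -1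
--         scoville.sort()
--     return answer
-- ===== SOURCE B (Python) =====
-- def solution(scoville, K):
--     # Sort once, then keep the working list sorted: each round removes the two
--     # smallest scovilles and re-inserts their mix by binary search, so there is
--     # no heap and no re-sort per round.  (Unlike the original, this does not
--     # mutate the caller's list; the equivalence is about the return value.)
--     s = sorted(scoville)
--     answer = 0
--     while s[0] < K:
--         if len(s) == 1:
--             return -1
--         x = s[0] + 2 * s[1]
--         del s[:2]
--         lo, hi = 0, len(s)
--         while lo < hi:
--             mid = (lo + hi) // 2
--             if s[mid] < x:
--                 lo = mid + 1
--             else: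
--                 hi = mid
--         s.insert(lo, x)
--         answer += 1
--     return answer
-- ===== Notes on version B (the rewrite author's own statement) =====
-- stated objective: faster
-- what changed: B drops the hand-rolled binary heap and the full re-sort done every round: it sorts once and each round removes the two smallest elements and re-inserts their mix in place via a hand-written binary search; unlike A it always mixes the two smallest (see differs).
-- intended difference: On inputs whose greedy mixing reaches a 3-element remainder still below K, A's broken sift-down makes it mix the minimum with the MAXIMUM instead of the second-smallest, so A's count/-1 is computed from the wrong mix; B mixes the two smallest as the problem intends, and D_ holds exactly where that changes the returned value. — e.g. on solution([1, 2, 100], 5): A returns 2, B returns 1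
import Mathlib
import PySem

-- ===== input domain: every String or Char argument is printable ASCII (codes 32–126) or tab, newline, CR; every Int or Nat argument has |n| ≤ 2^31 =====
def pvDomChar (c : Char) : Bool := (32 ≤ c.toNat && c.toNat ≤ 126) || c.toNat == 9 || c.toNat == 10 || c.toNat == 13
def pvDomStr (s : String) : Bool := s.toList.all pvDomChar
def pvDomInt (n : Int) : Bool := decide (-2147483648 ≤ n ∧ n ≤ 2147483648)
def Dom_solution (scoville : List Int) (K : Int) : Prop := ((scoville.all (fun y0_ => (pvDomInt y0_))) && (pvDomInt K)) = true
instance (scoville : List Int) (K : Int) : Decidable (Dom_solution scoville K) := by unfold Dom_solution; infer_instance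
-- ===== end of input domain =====

-- B replaces A's hand-rolled heap and per-round re-sort by one initial sort plus a
-- binary-searched insertion per round (note Python A sorts/mutates its `scoville`
-- argument in place, B does not — the equivalence is about the return value only),
-- and B always mixes the TWO SMALLEST elements, which on the D_-inputs below
-- differs from A's value (see D_solution).

-- ===== PORT A =====

-- the `while True` sift-down loop of heap_pop; `last` is last_node, fuel only makes the
-- loop total (the index grows, so `heap.length + 1` steps are never exhausted)
def heapPopSift (fuel : Nat) (heap : List Int) (last : Int) (index : Nat) : List Int :=
  match fuel with
  | 0 => heap
  | fuel + 1 =>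
    let a := index * 2 + 1
    let b := a + 1
    match heap[a]?, heap[b]? with          -- try: heap[a]; heap[b]  (none = IndexError branch)
    | some aN, some bN =>
      let target := if aN > bN then b else a
      let tN := if aN > bN then bN else aN -- heap[target]
      if tN < last then
        heapPopSift fuel ((heap.set index tN).set target last) last target
      else heap
    | _, _ => heap                         -- except IndexError: return

def heapPop (heap : List Int) : Int × List Int :=
  match heap with
  | [] => (0, [])                          -- heap.pop(0) raises IndexError: outside Pre_
  | top :: rest =>                         -- top_node = heap.pop(0)
    if rest.length = 0 then (top, rest)
    else
      match rest.getLast? with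
      | none => (top, rest)                -- unreachable (rest ≠ [])
      | some last =>                       -- last_node = heap.pop(); heap.insert(0, last_node)
        (top, heapPopSift (rest.length + 1) (last :: rest.dropLast) last 0)

-- the `while True` sift-up loop of heap_add; the running index can become negative
-- (Python then indexes from the back), so it is an Int and reads/writes use pyGet?/pySetD
def heapAddSift (fuel : Nat) (heap : List Int) (node : Int) (index : Int) : List Int :=
  match fuel with
  | 0 => heap
  | fuel + 1 =>
    -- int((index - 2) / 2): the dividend is even, so float division + int() is exact division
    let target := if PySem.Int.mod index 2 = 0 then (index - 2) / 2 else (index - 1) / 2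
    match PySem.List.pyGet? heap target with
    | none => heap                         -- IndexError: unreachable here (target is a valid Python index)
    | some tN =>
      if tN > node then
        heapAddSift fuel (PySem.List.pySetD (PySem.List.pySetD heap index tN) target node) node target
      else heap

def heapAdd (heap : List Int) (node : Int) : List Int :=
  let h := heap ++ [node]                  -- heap.append(node)
  let index : Int := (h.length : Int) - 1
  if index = 0 then h
  else heapAddSift (h.length + 3) h node index

-- the `while scoville[0] < K` loop; fuel `length + 1` is never exhausted (each round
-- shortens the list by one and the loop stops at length 1)
def solutionLoop (fuel : Nat) (scoville : List Int) (K answer : Int) : Int :=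
  match fuel with
  | 0 => answer
  | fuel + 1 =>
    match PySem.List.pyGet? scoville 0 with
    | none => answer                       -- scoville[0] raises IndexError: outside Pre_
    | some s0 =>
      if s0 < K then
        let answer := answer + 1
        let p1 := heapPop scoville         -- a = heap_pop(scoville)
        let p2 := heapPop p1.2             -- b = heap_pop(scoville)
        let h3 := heapAdd p2.2 (p1.1 + 2 * p2.1)
        if h3.length = 1 ∧ PySem.List.pyGetD h3 0 0 < K then -1
        else solutionLoop fuel (PySem.List.sorted h3 (fun x => x) false) K answer
      else answer

def solution (scoville : List Int) (K : Int) : Int :=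
  solutionLoop (scoville.length + 1) (PySem.List.sorted scoville (fun x => x) false) K 0

-- ===== PORT B =====

-- B's hand-written binary search: position of the first element ≥ x in s[lo:hi];
-- the fuel only makes the `while lo < hi` loop total (hi - lo shrinks every step,
-- so `hi - lo + 1` steps are never exhausted)
def bisectLoop (fuel : Nat) (s : List Int) (x : Int) (lo hi : Nat) : Nat :=
  match fuel with
  | 0 => lo
  | fuel + 1 =>
    if lo < hi then
      if s.getD ((lo + hi) / 2) 0 < x then bisectLoop fuel s x ((lo + hi) / 2 + 1) hi
      else bisectLoop fuel s x lo ((lo + hi) / 2)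
    else lo

def solutionAltLoop (fuel : Nat) (s : List Int) (K answer : Int) : Int :=
  match fuel with
  | 0 => answer
  | fuel + 1 =>
    match s with
    | [] => answer                         -- s[0] raises IndexError: outside Pre_
    | s0 :: t =>
      if s0 < K then
        match t with
        | [] => -1                         -- len(s) == 1
        | t1 :: rest =>                    -- x = s[0] + 2*s[1]; del s[:2]
          let x := s0 + 2 * t1
          solutionAltLoop fuel (PySem.List.insert rest ((bisectLoop (rest.length + 1) rest x 0 rest.length : Nat) : Int) x) K (answer + 1)
      else answer

def solution_alt (scoville : List Int) (K : Int) : Int :=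
  solutionAltLoop (scoville.length + 1) (PySem.List.sorted scoville (fun x => x) false) K 0

-- ===== PRECONDITION & SPEC =====

-- helpers for D_ (closed forms on the input, reaching neither port):
-- from a 3-element remainder a ≤ b ≤ c (below K), when the pair {b, a+2c} is kept:
-- 1 = done after one more mix, 0 = ends in -1, 2 = two more mixes
def fate (a b c K : Int) : Int :=
  let m := a + 2 * c
  if K ≤ min b m then 1 else if b + m + max b m < K then 0 else 2
-- greedy mixing on the sorted list, stopped at the 3-element remainder (if one is
-- reached still below K): there A keeps {b, a+2c}, B keeps {c, a+2b}; nonzero = they end apart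
def dgo (K : Int) : Nat → List Int → Int
  | f + 1, a :: b :: rest =>
    if K ≤ a then 0 else
    match rest with
    | [c] => fate a b c K - fate a c b K
    | _ => dgo K f (rest.orderedInsert LE.le (a + 2 * b))
  | _, _ => 0

-- Pre_ excludes exactly the inputs on which Python A raises IndexError: the empty list
-- (scoville[0]) and a single-element list below K (the second heap_pop pops from []).
def Pre_solution (scoville : List Int) (K : Int) : Prop :=
  scoville ≠ [] ∧ (scoville.length = 1 → ∀ x ∈ scoville, K ≤ x)
instance (scoville : List Int) (K : Int) : Decidable (Pre_solution scoville K) := by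
  unfold Pre_solution; infer_instance

def pvWitness_solution : List Int × Int := ([1, 2, 3], 7)

-- On inputs whose greedy mixing reaches a 3-element remainder still below K, A's broken
-- sift-down mixes the minimum with the MAXIMUM instead of the second-smallest, so A's
-- count/-1 comes from the wrong mix; B mixes the two smallest as intended, and D_ holds
-- exactly where that changes the returned value.
def D_solution (scoville : List Int) (K : Int) : Prop :=
  dgo K scoville.length (scoville.insertionSort LE.le) ≠ 0
instance (scoville : List Int) (K : Int) : Decidable (D_solution scoville K) := by
  unfold D_solution; infer_instance

def Spec_solution (scoville : List Int) (K : Int) (out : Int) : Prop :=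
  ¬ D_solution scoville K → out = solution_alt scoville K
instance (scoville : List Int) (K : Int) (out : Int) : Decidable (Spec_solution scoville K out) := by
  unfold Spec_solution; infer_instance

def pvDiffWitness_solution : List Int × Int := ([1, 2, 100], 5)
def pvDiffWitnessOut_solution : Int × Int := (2, 1)

-- ===== CLAIM (what is proved, stated in full; the proofs are below) =====
def Claim_unchanged_solution : Prop := ∀ (scoville : List Int) (K : Int), Dom_solution scoville K → Pre_solution scoville K → Spec_solution scoville K (solution scoville K)
def Claim_changed_solution : Prop := Dom_solution (pvDiffWitness_solution.1) (pvDiffWitness_solution.2) ∧ Pre_solution (pvDiffWitness_solution.1) (pvDiffWitness_solution.2) ∧ D_solution (pvDiffWitness_solution.1) (pvDiffWitness_solution.2) ∧ solution (pvDiffWitness_solution.1) (pvDiffWitness_solution.2) = pvDiffWitnessOut_solution.1 ∧ solution_alt (pvDiffWitness_solution.1) (pvDiffWitness_solution.2) = pvDiffWitnessOut_solution.2 ∧ pvDiffWitnessOut_solution.1 ≠ pvDiffWitnessOut_solution.2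
def Claim_exact_solution : Prop := ∀ (scoville : List Int) (K : Int), Dom_solution scoville K → Pre_solution scoville K → D_solution scoville K → solution scoville K ≠ solution_alt scoville K

-- ===== LEMMAS AND PROOFS =====

-- the greedy process of dgo with the reached 3-element remainder made explicit
def d3go : Nat → Int → List Int → Option (Int × Int × Int)
  | f + 1, K, a :: b :: rest =>
    if K ≤ a then none else
    match rest with
    | [c] => some (a, b, c)
    | _ => d3go f K (List.orderedInsert (· ≤ ·) (a + 2 * b) rest)
  | _, _, _ => none
def d3 (K : Int) (l : List Int) : Option (Int × Int × Int) := d3go l.length K l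
def d3diff (K : Int) (o : Option (Int × Int × Int)) : Bool :=
  match o with
  | some (a, b, c) => fate a b c K != fate a c b K
  | none => false

lemma dgo_d3go (f : Nat) : ∀ (K : Int) (l : List Int), (dgo K f l ≠ 0) ↔ d3diff K (d3go f K l) = true := by
  induction f with
  | zero => intro K l; cases l <;> simp [dgo, d3go, d3diff]
  | succ f ih =>
    intro K l
    match l with
    | [] => simp [dgo, d3go, d3diff]
    | [a] => simp [dgo, d3go, d3diff]
    | a :: b :: rest =>
      by_cases h : K ≤ a
      · match rest with
        | [] => simp [dgo, d3go, d3diff, h]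
        | [c] => simp [dgo, d3go, d3diff, h]
        | c :: d :: u => simp [dgo, d3go, d3diff, h]
      · match rest with
        | [] => simp only [dgo, d3go, h, if_false]; exact ih K _
        | [c] => simp [dgo, d3go, d3diff, h, sub_eq_zero]
        | c :: d :: u => simpa [dgo, d3go, d3diff, h] using ih K _

-- closed endgame forms (proof helpers): value of a loop from a sorted 2-element
-- remainder [x, y] with r rounds already counted …
def e2 (x y K r : Int) : Int := if x < K then (if x + 2 * y < K then -1 else r + 2) else r + 1
-- … and from a sorted 3-element remainder a ≤ b ≤ c below K: A mixes a with the
-- MAXIMUM c, the intended greedy (B) mixes a with the second-smallest b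
def endA (a b c K r : Int) : Int := if b ≤ a + 2 * c then e2 b (a + 2 * c) K r else e2 (a + 2 * c) b K r
def endB (a b c K r : Int) : Int := if c ≤ a + 2 * b then e2 c (a + 2 * b) K r else e2 (a + 2 * b) c K r

lemma end_eq_of_fate_eq (a b c K r : Int) (h : fate a b c K = fate a c b K) :
    endA a b c K r = endB a b c K r := by
  simp only [fate] at h
  simp only [min_def, max_def] at h
  unfold endA endB e2
  split_ifs at h ⊢ <;> omega

lemma end_ne_of_fate_ne (a b c K r : Int) (h : fate a b c K ≠ fate a c b K)
    (hr : 0 ≤ r) : endA a b c K r ≠ endB a b c K r := by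
  simp only [fate] at h
  simp only [min_def, max_def] at h
  unfold endA endB e2
  split_ifs at h ⊢ <;> omega

lemma swap_perm (l : List Int) (i j : Nat) (a b : Int)
    (hi : l[i]? = some a) (hj : l[j]? = some b) : ((l.set i b).set j a).Perm l := by
  obtain ⟨hilt, hia⟩ := List.getElem?_eq_some_iff.mp hi
  obtain ⟨hjlt, hjb⟩ := List.getElem?_eq_some_iff.mp hj
  have hjlt' : j < (l.set i b).length := by simpa using hjlt
  rw [List.perm_iff_count]
  intro x
  have hsb : (l.set i b)[j]'hjlt' = b := by
    by_cases hij : i = j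
    · subst hij; simp
    · rw [List.getElem_set_ne hij]; exact hjb
  have h1 : List.count x ((l.set i b).set j a)
      = (List.count x (l.set i b) - if ((l.set i b)[j]'hjlt' == x) then 1 else 0) + if (a == x) then 1 else 0 :=
    List.count_set hjlt'
  have h2 : List.count x (l.set i b)
      = (List.count x l - if (l[i] == x) then 1 else 0) + if (b == x) then 1 else 0 :=
    List.count_set hilt
  have hmem : a = x → 1 ≤ List.count x l := by
    intro h; subst h
    exact List.count_pos_iff.mpr (hia ▸ l.getElem_mem hilt)
  rw [h1, h2, hsb, hia]
  simp only [beq_iff_eq]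
  split_ifs with h h' h' <;> simp_all

lemma popSift_perm (fuel : Nat) (heap : List Int) (last : Int) (index : Nat)
    (h : heap[index]? = some last) : (heapPopSift fuel heap last index).Perm heap := by
  induction fuel generalizing heap index with
  | zero => simp [heapPopSift]
  | succ n ih =>
    rw [heapPopSift]
    cases hA : heap[index * 2 + 1]? with
    | none => simp
    | some aN =>
      cases hB : heap[index * 2 + 1 + 1]? with
      | none => simp
      | some bN =>
        by_cases hab : aN > bN
        · simp only [if_pos hab]
          by_cases hlt : bN < last
          · rw [if_pos hlt]
            exact (ih _ _ (List.getElem?_set_self (by simpa using (List.getElem?_eq_some_iff.mp hB).1))).trans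
              (swap_perm heap index (index * 2 + 1 + 1) last bN h hB)
          · rw [if_neg hlt]
        · simp only [if_neg hab]
          by_cases hlt : aN < last
          · rw [if_pos hlt]
            exact (ih _ _ (List.getElem?_set_self (by simpa using (List.getElem?_eq_some_iff.mp hA).1))).trans
              (swap_perm heap index (index * 2 + 1) last aN h hA)
          · rw [if_neg hlt]

lemma popSift_head (fuel : Nat) (heap : List Int) (last : Int) (index : Nat)
    (h : 1 ≤ index) : (heapPopSift fuel heap last index).head? = heap.head? := by
  induction fuel generalizing heap index with
  | zero => simp [heapPopSift]
  | succ n ih =>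
    rw [heapPopSift]
    cases hA : heap[index * 2 + 1]? with
    | none => simp
    | some aN =>
      cases hB : heap[index * 2 + 1 + 1]? with
      | none => simp
      | some bN =>
        by_cases hab : aN > bN
        · simp only [if_pos hab]
          by_cases hlt : bN < last
          · rw [if_pos hlt]
            rw [ih _ _ (by omega)]
            simp [List.head?_eq_getElem?, List.getElem?_set_ne (by omega : index ≠ 0),
              List.getElem?_set_ne (by omega : index * 2 + 1 + 1 ≠ 0)]
          · rw [if_neg hlt]
        · simp only [if_neg hab]
          by_cases hlt : aN < last
          · rw [if_pos hlt]
            rw [ih _ _ (by omega)]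
            simp [List.head?_eq_getElem?, List.getElem?_set_ne (by omega : index ≠ 0),
              List.getElem?_set_ne (by omega : index * 2 + 1 ≠ 0)]
          · rw [if_neg hlt]

lemma heapPop_fst (x : Int) (t : List Int) : (heapPop (x :: t)).1 = x := by
  rw [heapPop]
  split
  · rfl
  · split <;> rfl

lemma heapPop_snd_perm (x : Int) (t : List Int) : (heapPop (x :: t)).2.Perm t := by
  rw [heapPop]
  by_cases ht : t.length = 0
  · rw [if_pos ht]
  · rw [if_neg ht]
    have htne : t ≠ [] := by intro h; simp [h] at ht
    rw [List.getLast?_eq_some_getLast htne]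
    refine (popSift_perm _ _ _ 0 (by simp)).trans ?_
    have h2 : (t.dropLast ++ [t.getLast htne]).Perm t := by
      rw [List.dropLast_append_getLast htne]
    exact (List.perm_append_singleton (t.getLast htne) t.dropLast).symm.trans h2

-- on a sorted list of length ≥ 4 the first heap_pop leaves the value of the second
-- smallest element on top
lemma pop2_head (s0 s1 s2 c : Int) (t : List Int)
    (hp : (s0 :: s1 :: s2 :: c :: t).Pairwise (· ≤ ·)) :
    (heapPop (s0 :: s1 :: s2 :: c :: t)).2.head? = some s1 := by
  have hr : (s1 :: s2 :: c :: t) ≠ [] := by simp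
  have h12 : s1 ≤ s2 := by
    have := hp.of_cons; exact (List.pairwise_cons.mp this).1 s2 (by simp)
  have h1L : s1 ≤ (s1 :: s2 :: c :: t).getLast hr := by
    have hmem := List.getLast_mem hr
    rcases List.mem_cons.mp hmem with h | h
    · omega
    · exact (List.pairwise_cons.mp hp.of_cons).1 _ h
  rw [heapPop]
  rw [if_neg (by simp), List.getLast?_eq_some_getLast hr]
  set L := (s1 :: s2 :: c :: t).getLast hr with hL
  have hdl : (s1 :: s2 :: c :: t).dropLast = s1 :: s2 :: (c :: t).dropLast := by
    rw [List.dropLast_cons₂, List.dropLast_cons₂]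
  rw [hdl]
  simp only [List.length_cons]
  rw [heapPopSift]
  have hgt : ¬ (s1 > s2) := by omega
  simp only [show (0:Nat)*2+1 = 1 from rfl, show (0:Nat)*2+1+1 = 2 from rfl,
    List.getElem?_cons_succ, List.getElem?_cons_zero, hgt, if_false]
  by_cases hlt : s1 < L
  · rw [if_pos hlt]
    have hswap : ((L :: s1 :: s2 :: (c :: t).dropLast).set 0 s1).set 1 L
        = s1 :: L :: s2 :: (c :: t).dropLast := by simp [List.set]
    rw [hswap, popSift_head _ _ _ _ (by omega)]
    rfl
  · rw [if_neg hlt]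
    have : L = s1 := by omega
    simp [this]

lemma pyGet?_some_resolve (xs : List Int) (i : Int) (v : Int)
    (h : PySem.List.pyGet? xs i = some v) :
    ∃ k : Nat, PySem.List.pyIdx? xs.length i = some k ∧ xs[k]? = some v := by
  unfold PySem.List.pyGet? at h
  cases hk : PySem.List.pyIdx? xs.length i with
  | none => rw [hk] at h; simp at h
  | some k => rw [hk] at h; exact ⟨k, rfl, h⟩

lemma pySetD_of_idx (xs : List Int) (i : Int) (v : Int) (k : Nat)
    (hk : PySem.List.pyIdx? xs.length i = some k) :
    PySem.List.pySetD xs i v = xs.set k v := by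
  unfold PySem.List.pySetD PySem.List.pySet?
  rw [hk]; rfl

lemma addSift_perm (fuel : Nat) (heap : List Int) (node : Int) (index : Int)
    (h : PySem.List.pyGet? heap index = some node) :
    (heapAddSift fuel heap node index).Perm heap := by
  induction fuel generalizing heap index with
  | zero => simp [heapAddSift]
  | succ n ih =>
    rw [heapAddSift]
    set target := if PySem.Int.mod index 2 = 0 then (index - 2) / 2 else (index - 1) / 2 with htarget
    cases hT : PySem.List.pyGet? heap target with
    | none => exact List.Perm.refl _
    | some tN =>
      dsimp only
      by_cases hgt : tN > node
      · rw [if_pos hgt]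
        obtain ⟨k, hk, hkv⟩ := pyGet?_some_resolve _ _ _ h
        obtain ⟨k', hk', hk'v⟩ := pyGet?_some_resolve _ _ _ hT
        have hklt : k' < heap.length := (List.getElem?_eq_some_iff.mp hk'v).1
        have hset1 : PySem.List.pySetD heap index tN = heap.set k tN := pySetD_of_idx _ _ _ _ hk
        have hset2 : PySem.List.pySetD (heap.set k tN) target node = (heap.set k tN).set k' node :=
          pySetD_of_idx _ _ _ _ (by rw [List.length_set]; exact hk')
        rw [hset1, hset2]
        have hperm : ((heap.set k tN).set k' node).Perm heap := swap_perm heap k k' node tN hkv hk'v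
        refine (ih _ _ ?_).trans hperm
        unfold PySem.List.pyGet?
        rw [show ((heap.set k tN).set k' node).length = heap.length by simp, hk']
        exact List.getElem?_set_self (by simpa using hklt)
      · rw [if_neg hgt]

lemma heapAdd_perm (h : List Int) (x : Int) : (heapAdd h x).Perm (x :: h) := by
  unfold heapAdd
  simp only [List.length_append, List.length_cons, List.length_nil, Nat.zero_add]
  by_cases h0 : ((h.length + 1 : Nat) : Int) - 1 = 0
  · rw [if_pos h0]
    exact List.perm_append_singleton x h
  · rw [if_neg h0]
    refine (addSift_perm _ _ _ _ ?_).trans (List.perm_append_singleton x h)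
    unfold PySem.List.pyGet?
    have hlen : (h ++ [x]).length = h.length + 1 := by simp
    have hidx : PySem.List.pyIdx? (h ++ [x]).length (((h.length + 1 : Nat) : Int) - 1) = some h.length := by
      unfold PySem.List.pyIdx?
      rw [hlen]
      rw [if_pos (by push_cast; omega)]
      rw [if_pos (by push_cast; omega)]
      congr 1
      omega
    rw [hidx]
    exact List.getElem?_concat_length

lemma sorted_getD_mono (s : List Int) (hp : s.Pairwise (· ≤ ·)) (i j : Nat)
    (h1 : i ≤ j) (h2 : j < s.length) : s.getD i 0 ≤ s.getD j 0 := by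
  rcases Nat.lt_or_ge i j with hij | hij
  · rw [List.getD_eq_getElem s 0 (by omega), List.getD_eq_getElem s 0 h2]
    exact List.pairwise_iff_getElem.mp hp i j (by omega) h2 hij
  · have : i = j := by omega
    subst this; rfl

lemma bisect_spec (s : List Int) (x : Int) (hp : s.Pairwise (· ≤ ·)) :
    ∀ (fuel lo hi : Nat), hi - lo < fuel → hi ≤ s.length → lo ≤ hi →
    (∀ k, k < lo → s.getD k 0 < x) → (∀ k, hi ≤ k → k < s.length → x ≤ s.getD k 0) →
    bisectLoop fuel s x lo hi ≤ s.length ∧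
    (∀ k, k < bisectLoop fuel s x lo hi → s.getD k 0 < x) ∧
    (∀ k, bisectLoop fuel s x lo hi ≤ k → k < s.length → x ≤ s.getD k 0) := by
  intro fuel
  induction fuel with
  | zero => intro lo hi hn; omega
  | succ m ih =>
    intro lo hi hn hlen hle inv1 inv2
    rw [bisectLoop]
    by_cases hlohi : lo < hi
    · rw [if_pos hlohi]
      by_cases hmid : s.getD ((lo + hi) / 2) 0 < x
      · rw [if_pos hmid]
        refine ih ((lo + hi) / 2 + 1) hi (by omega) hlen (by omega) ?_ inv2
        intro k hk
        rcases Nat.lt_or_ge k lo with h | h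
        · exact inv1 k h
        · exact lt_of_le_of_lt (sorted_getD_mono s hp k ((lo + hi) / 2) (by omega) (by omega)) hmid
      · rw [if_neg hmid]
        refine ih lo ((lo + hi) / 2) (by omega) (by omega) (by omega) inv1 ?_
        intro k hk1 hk2
        exact le_trans (not_lt.mp hmid) (sorted_getD_mono s hp ((lo + hi) / 2) k hk1 hk2)
    · rw [if_neg hlohi]
      exact ⟨by omega, inv1, fun k hk1 hk2 => inv2 k (by omega) hk2⟩

lemma insert_sorted (rest : List Int) (x : Int) (hp : rest.Pairwise (· ≤ ·)) :
    (PySem.List.insert rest ((bisectLoop (rest.length + 1) rest x 0 rest.length : Nat) : Int) x).Pairwise (· ≤ ·) ∧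
    (PySem.List.insert rest ((bisectLoop (rest.length + 1) rest x 0 rest.length : Nat) : Int) x).Perm (x :: rest) := by
  obtain ⟨hple, hlt, hge⟩ := bisect_spec rest x hp (rest.length + 1) 0 rest.length (by omega) le_rfl
    (by omega) (by omega) (fun k hk1 hk2 => by omega)
  set p := bisectLoop (rest.length + 1) rest x 0 rest.length with hpdef
  rw [PySem.List.insert_natCast rest p x hple]
  have hmem_take : ∀ y ∈ rest.take p, y < x := by
    intro y hy
    obtain ⟨i, hi, rfl⟩ := List.mem_iff_getElem.mp hy
    rw [List.getElem_take]
    have hip : i < p := by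
      have := hi; rw [List.length_take] at this; omega
    have : rest[i] = rest.getD i 0 := by
      rw [List.getD_eq_getElem rest 0]
    rw [this]
    exact hlt i hip
  have hmem_drop : ∀ y ∈ rest.drop p, x ≤ y := by
    intro y hy
    obtain ⟨i, hi, rfl⟩ := List.mem_iff_getElem.mp hy
    rw [List.getElem_drop]
    have hilen : p + i < rest.length := by
      have := hi; rw [List.length_drop] at this; omega
    rw [show rest[p + i] = rest.getD (p + i) 0 from by rw [List.getD_eq_getElem rest 0]]
    exact hge (p + i) (by omega) hilen
  constructor
  · rw [List.pairwise_append]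
    refine ⟨hp.sublist (List.take_sublist p rest), ?_, ?_⟩
    · rw [List.pairwise_cons]
      exact ⟨hmem_drop, hp.sublist (List.drop_sublist p rest)⟩
    · intro a ha b hb
      rcases List.mem_cons.mp hb with rfl | hb
      · exact le_of_lt (hmem_take a ha)
      · exact le_trans (le_of_lt (hmem_take a ha)) (hmem_drop b hb)
  · refine List.perm_middle.trans ?_
    rw [List.take_append_drop]

lemma pyGet?_zero_cons (a : Int) (l : List Int) : PySem.List.pyGet? (a :: l) 0 = some a := by
  simp [PySem.List.pyGet?, PySem.List.pyIdx?]

-- the heap state after one round of A's loop body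
def h3A (s : List Int) : List Int :=
  heapAdd (heapPop (heapPop s).2).2 ((heapPop s).1 + 2 * (heapPop (heapPop s).2).1)

lemma loop_cons (f : Nat) (s0 : Int) (t : List Int) (K ans : Int) :
    solutionLoop (f + 1) (s0 :: t) K ans
      = if s0 < K then
          (if (h3A (s0 :: t)).length = 1 ∧ PySem.List.pyGetD (h3A (s0 :: t)) 0 0 < K then -1
           else solutionLoop f (PySem.List.sorted (h3A (s0 :: t)) (fun x => x) false) K (ans + 1))
        else ans := by
  conv_lhs => rw [solutionLoop]; rw [pyGet?_zero_cons]
  rfl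

lemma altLoop_cons (f : Nat) (s0 : Int) (t : List Int) (K ans : Int) :
    solutionAltLoop (f + 1) (s0 :: t) K ans
      = if s0 < K then
          (match t with
           | [] => (-1 : Int)
           | t1 :: rest => solutionAltLoop f
               (PySem.List.insert rest ((bisectLoop (rest.length + 1) rest (s0 + 2 * t1) 0 rest.length : Nat) : Int) (s0 + 2 * t1)) K (ans + 1))
        else ans := by
  conv_lhs => rw [solutionAltLoop.eq_def]

lemma loopB_one (f : Nat) (hf : 1 ≤ f) (v K ans : Int) :
    solutionAltLoop f [v] K ans = if v < K then -1 else ans := by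
  obtain ⟨g, rfl⟩ : ∃ g, f = g + 1 := ⟨f - 1, by omega⟩
  rw [altLoop_cons]

lemma h3A_one (v : Int) : h3A [v] = [v + 2 * 0] := by
  have hpop : heapPop [v] = (v, []) := by simp [heapPop]
  have hpop2 : heapPop ([] : List Int) = (0, []) := by simp [heapPop]
  rw [h3A, hpop, hpop2]
  simp [heapAdd]

lemma loopA_one (f : Nat) (hf : 1 ≤ f) (v K ans : Int) :
    solutionLoop f [v] K ans = if v < K then -1 else ans := by
  obtain ⟨g, rfl⟩ : ∃ g, f = g + 1 := ⟨f - 1, by omega⟩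
  rw [loop_cons]
  by_cases hv : v < K
  · rw [if_pos hv, if_pos hv, h3A_one]
    rw [if_pos ⟨rfl, by simpa using hv⟩]
  · rw [if_neg hv, if_neg hv]

lemma h3A_two (x y : Int) : h3A [x, y] = [x + 2 * y] := by
  have hpop : heapPop [x, y] = (x, [y]) := by simp [heapPop, heapPopSift, List.getLast?]
  have hpop2 : heapPop [y] = (y, []) := by simp [heapPop]
  rw [h3A, hpop, hpop2]
  simp [heapAdd]

lemma loopA_two (f : Nat) (hf : 2 ≤ f) (x y K ans : Int) :
    solutionLoop f [x, y] K (ans + 1) = e2 x y K ans := by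
  obtain ⟨g, rfl⟩ : ∃ g, f = g + 1 := ⟨f - 1, by omega⟩
  rw [loop_cons]
  by_cases hx : x < K
  · rw [if_pos hx, h3A_two]
    by_cases hv : x + 2 * y < K
    · rw [if_pos ⟨rfl, by simpa using hv⟩]
      unfold e2
      rw [if_pos hx, if_pos hv]
    · rw [if_neg (by intro hc; exact hv (by simpa using hc.2))]
      rw [PySem.List.sorted_eq_self_of_pairwise _ _ (List.pairwise_singleton _ _)]
      rw [loopA_one g (by omega)]
      rw [if_neg hv]
      unfold e2
      rw [if_pos hx, if_neg hv]
      ring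
  · rw [if_neg hx]
    unfold e2
    rw [if_neg hx]

lemma loopB_two (f : Nat) (hf : 2 ≤ f) (x y K ans : Int) :
    solutionAltLoop f [x, y] K (ans + 1) = e2 x y K ans := by
  obtain ⟨g, rfl⟩ : ∃ g, f = g + 1 := ⟨f - 1, by omega⟩
  rw [altLoop_cons]
  by_cases hx : x < K
  · rw [if_pos hx]
    have hb : bisectLoop (List.length ([] : List Int) + 1) [] (x + 2 * y) 0 (List.length ([] : List Int)) = 0 := rfl
    dsimp only
    rw [hb]
    rw [show ((0 : Nat) : Int) = 0 from rfl, PySem.List.insert_zero]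
    rw [loopB_one g (by omega)]
    unfold e2
    rw [if_pos hx]
    split
    · rfl
    · ring
  · rw [if_neg hx]
    unfold e2
    rw [if_neg hx]

lemma d3_two (K a b : Int) : d3 K [a, b] = none := by
  show d3go 2 K [a, b] = none
  rw [show (2 : Nat) = 1 + 1 from rfl]
  simp [d3go, List.orderedInsert]

lemma d3_three (K a b c : Int) : d3 K [a, b, c] = if a < K then some (a, b, c) else none := by
  show d3go 3 K [a, b, c] = _
  rw [show (3 : Nat) = 2 + 1 from rfl]
  simp [d3go]
  split
  · rw [if_neg (by omega)]
  · rw [if_pos (by omega)]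

lemma d3_cons4 (K a b c d : Int) (u : List Int) :
    d3 K (a :: b :: c :: d :: u)
      = if a < K then d3 K (List.orderedInsert (· ≤ ·) (a + 2 * b) (c :: d :: u)) else none := by
  show d3go ((a :: b :: c :: d :: u).length) K _ = _
  simp only [List.length_cons]
  rw [show u.length + 1 + 1 + 1 + 1 = (u.length + 1 + 1 + 1) + 1 from rfl]
  show (if K ≤ a then none else
      match c :: d :: u with
      | [c'] => some (a, b, c')
      | _ => d3go (u.length + 1 + 1 + 1) K (List.orderedInsert (· ≤ ·) (a + 2 * b) (c :: d :: u))) = _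
  unfold d3
  rw [show (List.orderedInsert (· ≤ ·) (a + 2 * b) (c :: d :: u)).length = u.length + 1 + 1 + 1 from by
    rw [List.orderedInsert_length]; simp]
  split
  · rw [if_neg (by omega)]
  · rw [if_pos (by omega)]

-- the 3-element endgame of A's loop
lemma loopA_three (f : Nat) (hf : 3 ≤ f) (a b c K ans : Int) (haK : a < K) :
    solutionLoop (f + 1) [a, b, c] K ans = endA a b c K ans := by
  rw [loop_cons, if_pos haK]
  have hpop : heapPop [a, b, c] = (a, [c, b]) := by
    simp [heapPop, heapPopSift, List.getLast?]
  have hpop2 : heapPop [c, b] = (c, [b]) := by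
    simp [heapPop, heapPopSift, List.getLast?]
  have h3eq : h3A [a, b, c] = heapAdd [b] (a + 2 * c) := by rw [h3A, hpop, hpop2]
  have hperm : (heapAdd [b] (a + 2 * c)).Perm [a + 2 * c, b] := heapAdd_perm [b] (a + 2 * c)
  have hlen2 : (h3A [a, b, c]).length = 2 := by rw [h3eq, hperm.length_eq]; rfl
  rw [if_neg (by intro hc; rw [hlen2] at hc; exact absurd hc.1 (by omega))]
  by_cases hbx : b ≤ a + 2 * c
  · have hsrt : PySem.List.sorted (h3A [a, b, c]) (fun x => x) false = [b, a + 2 * c] := by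
      rw [h3eq]
      exact PySem.List.sorted_id_eq_of_perm_of_pairwise _ _
        ((List.Perm.swap (a + 2 * c) b []).trans hperm.symm)
        (List.pairwise_cons.mpr ⟨by intro y hy; simp at hy; subst hy; exact hbx,
          List.pairwise_singleton _ _⟩)
    rw [hsrt, loopA_two f (by omega)]
    rw [endA, if_pos hbx]
  · have hsrt : PySem.List.sorted (h3A [a, b, c]) (fun x => x) false = [a + 2 * c, b] := by
      rw [h3eq]
      exact PySem.List.sorted_id_eq_of_perm_of_pairwise _ _ hperm.symm
        (List.pairwise_cons.mpr ⟨by intro y hy; simp at hy; subst hy; omega,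
          List.pairwise_singleton _ _⟩)
    rw [hsrt, loopA_two f (by omega)]
    rw [endA, if_neg hbx]

-- the 3-element endgame of B's loop
lemma loopB_three (f : Nat) (hf : 3 ≤ f) (a b c K ans : Int) (haK : a < K) :
    solutionAltLoop (f + 1) [a, b, c] K ans = endB a b c K ans := by
  rw [altLoop_cons, if_pos haK]
  dsimp only
  obtain ⟨hins_pw, hins_perm⟩ := insert_sorted [c] (a + 2 * b) (List.pairwise_singleton _ _)
  by_cases hcx : c ≤ a + 2 * b
  · have heq : PySem.List.insert [c]
        ((bisectLoop ([c].length + 1) [c] (a + 2 * b) 0 [c].length : Nat) : Int) (a + 2 * b)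
        = [c, a + 2 * b] := by
      refine List.Perm.eq_of_pairwise (fun p q _ _ h1 h2 => le_antisymm h1 h2) hins_pw ?_
        (hins_perm.trans (List.Perm.swap c (a + 2 * b) []))
      exact List.pairwise_cons.mpr ⟨by intro y hy; simp at hy; subst hy; exact hcx,
        List.pairwise_singleton _ _⟩
    rw [heq, loopB_two f (by omega)]
    rw [endB, if_pos hcx]
  · have heq : PySem.List.insert [c]
        ((bisectLoop ([c].length + 1) [c] (a + 2 * b) 0 [c].length : Nat) : Int) (a + 2 * b)
        = [a + 2 * b, c] := by
      refine List.Perm.eq_of_pairwise (fun p q _ _ h1 h2 => le_antisymm h1 h2) hins_pw ?_ hins_perm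
      exact List.pairwise_cons.mpr ⟨by intro y hy; simp at hy; subst hy; omega,
        List.pairwise_singleton _ _⟩
    rw [heq, loopB_two f (by omega)]
    rw [endB, if_neg hcx]

-- the main loop lemma: both loops follow the greedy process d3; they stay equal as
-- long as no 3-element remainder below K is reached, and otherwise reduce to the
-- closed endgame forms endA / endB
lemma main_loop (fuel : Nat) : ∀ (s : List Int) (K ans : Int), s.Pairwise (· ≤ ·) →
    s.length < fuel →
    (d3 K s = none → solutionLoop fuel s K ans = solutionAltLoop fuel s K ans) ∧
    (∀ a b c : Int, d3 K s = some (a, b, c) →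
      solutionLoop fuel s K ans = endA a b c K (ans + ((s.length - 3 : Nat) : Int)) ∧
      solutionAltLoop fuel s K ans = endB a b c K (ans + ((s.length - 3 : Nat) : Int))) := by
  induction fuel with
  | zero => intro s K ans _ h; omega
  | succ f ih =>
    intro s K ans hp hlen
    match s with
    | [] =>
      refine ⟨fun _ => ?_, fun a b c h => by cases h⟩
      rw [solutionLoop, solutionAltLoop]
      simp [PySem.List.pyGet?, PySem.List.pyIdx?]
    | [v] =>
      refine ⟨fun _ => ?_, fun a b c h => by cases h⟩
      rw [loopA_one (f + 1) (by omega), loopB_one (f + 1) (by omega)]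
    | [x, y] =>
      refine ⟨fun _ => ?_, fun a b c h => by rw [d3_two] at h; cases h⟩
      simp only [List.length_cons, List.length_nil] at hlen
      by_cases hx : x < K
      · have h2 : solutionLoop (f + 1) [x, y] K (ans - 1 + 1) = e2 x y K (ans - 1) :=
          loopA_two (f + 1) (by omega) x y K (ans - 1)
        have h2' : solutionAltLoop (f + 1) [x, y] K (ans - 1 + 1) = e2 x y K (ans - 1) :=
          loopB_two (f + 1) (by omega) x y K (ans - 1)
        rw [show ans - 1 + 1 = ans by ring] at h2 h2'
        rw [h2, h2']
      · rw [loop_cons, altLoop_cons, if_neg hx, if_neg hx]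
    | [a, b, c] =>
      simp only [List.length_cons, List.length_nil] at hlen
      by_cases haK : a < K
      · refine ⟨fun h => ?_, fun a' b' c' h => ?_⟩
        · rw [d3_three, if_pos haK] at h; cases h
        rw [d3_three, if_pos haK] at h
        have habc : a = a' ∧ b = b' ∧ c = c' := by
          simpa [Prod.ext_iff] using h
        obtain ⟨rfl, rfl, rfl⟩ := habc
        have hr : ans + (((3 - 3 : Nat) : Nat) : Int) = ans := by norm_num
        constructor
        · rw [loopA_three f (by omega) a b c K ans haK]
          simp only [List.length_cons, List.length_nil]
          rw [hr]
        · rw [loopB_three f (by omega) a b c K ans haK]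
          simp only [List.length_cons, List.length_nil]
          rw [hr]
      · refine ⟨fun _ => ?_, fun a' b' c' h => ?_⟩
        · rw [loop_cons, altLoop_cons, if_neg haK, if_neg haK]
        · rw [d3_three, if_neg haK] at h; cases h
    | a :: b :: c :: d :: u =>
      simp only [List.length_cons] at hlen
      by_cases haK : a < K
      case neg =>
        refine ⟨fun _ => ?_, fun a' b' c' h => ?_⟩
        · rw [loop_cons, altLoop_cons, if_neg haK, if_neg haK]
        · rw [d3_cons4, if_neg haK] at h; cases h
      case pos =>
        -- the canonical next state
        set s' := List.orderedInsert (· ≤ ·) (a + 2 * b) (c :: d :: u) with hs'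
        have hpw' : s'.Pairwise (· ≤ ·) := List.Pairwise.orderedInsert _ _ (hp.of_cons.of_cons)
        have hperm' : s'.Perm ((a + 2 * b) :: c :: d :: u) := List.perm_orderedInsert _ _ _
        have hlens' : s'.length = u.length + 3 := by
          rw [hperm'.length_eq]; simp
        -- A's heap state after the round is a permutation of the canonical next state
        have hfst : (heapPop (a :: b :: c :: d :: u)).1 = a := heapPop_fst _ _
        have hsnd : (heapPop (a :: b :: c :: d :: u)).2.Perm (b :: c :: d :: u) :=
          heapPop_snd_perm _ _
        have hhead : (heapPop (a :: b :: c :: d :: u)).2.head? = some b :=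
          pop2_head a b c d u hp
        obtain ⟨r1, hr1⟩ : ∃ r1, (heapPop (a :: b :: c :: d :: u)).2 = b :: r1 := by
          cases hc : (heapPop (a :: b :: c :: d :: u)).2 with
          | nil => rw [hc] at hhead; simp at hhead
          | cons hd tl =>
            rw [hc] at hhead; simp at hhead
            exact ⟨tl, by rw [hhead]⟩
        rw [hr1] at hsnd
        have hr1perm : r1.Perm (c :: d :: u) := hsnd.cons_inv
        have hfst2 : (heapPop (b :: r1)).1 = b := heapPop_fst _ _
        have hsnd2 : (heapPop (b :: r1)).2.Perm r1 := heapPop_snd_perm _ _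
        have hadd : (h3A (a :: b :: c :: d :: u)).Perm ((a + 2 * b) :: c :: d :: u) := by
          rw [h3A, hr1, hfst, hfst2]
          exact (heapAdd_perm _ _).trans ((hsnd2.trans hr1perm).cons _)
        -- both loops step to the canonical next state
        have hsrtA : PySem.List.sorted (h3A (a :: b :: c :: d :: u)) (fun x => x) false = s' :=
          PySem.List.sorted_id_eq_of_perm_of_pairwise _ _ (hperm'.trans hadd.symm) hpw'
        obtain ⟨hins_pw, hins_perm⟩ := insert_sorted (c :: d :: u) (a + 2 * b) (hp.of_cons.of_cons)
        have hB : PySem.List.insert (c :: d :: u)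
            ((bisectLoop ((c :: d :: u).length + 1) (c :: d :: u) (a + 2 * b) 0 (c :: d :: u).length : Nat) : Int)
            (a + 2 * b) = s' :=
          List.Perm.eq_of_pairwise (fun p q _ _ h1 h2 => le_antisymm h1 h2) hins_pw hpw'
            (hins_perm.trans hperm'.symm)
        have hA : solutionLoop (f + 1) (a :: b :: c :: d :: u) K ans
            = solutionLoop f s' K (ans + 1) := by
          rw [loop_cons, if_pos haK]
          rw [if_neg (by intro hc; have := hadd.length_eq; rw [hc.1] at this; simp at this)]
          rw [hsrtA]
        have hBB : solutionAltLoop (f + 1) (a :: b :: c :: d :: u) K ans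
            = solutionAltLoop f s' K (ans + 1) := by
          rw [altLoop_cons, if_pos haK]
          dsimp only
          rw [hB]
        have hd3 : d3 K (a :: b :: c :: d :: u) = d3 K s' := by
          rw [d3_cons4, if_pos haK]
        have hlt' : s'.length < f := by omega
        refine ⟨fun h => ?_, fun a' b' c' h => ?_⟩
        · rw [hA, hBB]
          exact (ih s' K (ans + 1) hpw' hlt').1 (by rw [← hd3]; exact h)
        · have h' : d3 K s' = some (a', b', c') := by rw [← hd3]; exact h
          obtain ⟨hA2, hB2⟩ := (ih s' K (ans + 1) hpw' hlt').2 a' b' c' h'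
          have hreq : ans + 1 + ((s'.length - 3 : Nat) : Int)
              = ans + (((a :: b :: c :: d :: u).length - 3 : Nat) : Int) := by
            rw [hlens']
            have e1 : (u.length + 3 - 3 : Nat) = u.length := by omega
            have e2 : (u.length + 1 + 1 + 1 + 1 - 3 : Nat) = u.length + 1 := by omega
            simp only [List.length_cons, e1, e2]
            push_cast
            ring
          rw [hA, hBB, hA2, hB2, hreq]
          exact ⟨rfl, rfl⟩

-- ===== VERDICT (by name: the statements are the Claim_ definitions above) =====
theorem solution_spec : Claim_unchanged_solution := by
  intro scoville K _ _ hD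
  show solution scoville K = solution_alt scoville K
  have hDd : D_solution scoville K ↔ (d3diff K (d3 K (scoville.insertionSort (· ≤ ·))) = true) := by
    unfold D_solution d3
    rw [List.length_insertionSort]
    exact dgo_d3go _ _ _
  unfold solution solution_alt
  have hpw := PySem.List.sorted_pairwise scoville (fun x => x)
  have hlen : (PySem.List.sorted scoville (fun x => x) false).length < scoville.length + 1 := by
    rw [PySem.List.length_sorted]; omega
  have hms : PySem.List.sorted scoville (fun x => x) false
      = scoville.insertionSort (· ≤ ·) :=
    PySem.List.sorted_id_eq_of_perm_of_pairwise _ _ (List.perm_insertionSort _ _)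
      (List.pairwise_insertionSort _ _)
  cases hc : d3 K (PySem.List.sorted scoville (fun x => x) false) with
  | none => exact (main_loop _ _ K 0 hpw hlen).1 hc
  | some abc =>
    obtain ⟨a, b, c⟩ := abc
    obtain ⟨h1, h2⟩ := (main_loop _ _ K 0 hpw hlen).2 a b c hc
    rw [h1, h2]
    apply end_eq_of_fate_eq
    rw [hDd, ← hms, hc] at hD
    simpa [d3diff] using hD

theorem solution_changed : Claim_changed_solution := by
  unfold Claim_changed_solution; decide

theorem solution_tight : Claim_exact_solution := by
  intro scoville K _ _ hD
  unfold solution solution_alt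
  have hpw := PySem.List.sorted_pairwise scoville (fun x => x)
  have hlen : (PySem.List.sorted scoville (fun x => x) false).length < scoville.length + 1 := by
    rw [PySem.List.length_sorted]; omega
  have hDd : D_solution scoville K ↔ (d3diff K (d3 K (scoville.insertionSort (· ≤ ·))) = true) := by
    unfold D_solution d3
    rw [List.length_insertionSort]
    exact dgo_d3go _ _ _
  have hms : PySem.List.sorted scoville (fun x => x) false
      = scoville.insertionSort (· ≤ ·) :=
    PySem.List.sorted_id_eq_of_perm_of_pairwise _ _ (List.perm_insertionSort _ _)
      (List.pairwise_insertionSort _ _)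
  rw [hDd, ← hms] at hD
  cases hc : d3 K (PySem.List.sorted scoville (fun x => x) false) with
  | none => rw [hc] at hD; simp [d3diff] at hD
  | some abc =>
    obtain ⟨a, b, c⟩ := abc
    obtain ⟨h1, h2⟩ := (main_loop _ _ K 0 hpw hlen).2 a b c hc
    rw [h1, h2]
    rw [hc] at hD
    simp [d3diff] at hD
    exact end_ne_of_fate_ne a b c K _ hD (by positivity)
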